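-- pv_equiv track=rewrite | github.com/JakubDanihel/bagels_python3 | main.py | getNapovedy
-- ===== SOURCE A (Python) =====
-- def getNapovedy(pokus, taj_cislo):
--     #ak je napveda rovnaka ako tajne cislo
--     if pokus == taj_cislo:
--         return "Spravne!"
--
--     #vytvorenie prazdnej napovedy
--     napoveda = []
--
--     #tvorba napovedy
--     for i in range(len(pokus)):
--         #ak sa jedno cislo nachadza v casti hladaneho cisla a je na spravnom mieste
--         if pokus[i] == taj_cislo[i]:
--             napoveda.append("Fermi")
--
--         #ak sa jedno cislo nachadza v casti hadaneho cisla ale nie je na spravnom mieste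
--         elif pokus[i] in taj_cislo:
--             napoveda.append("Pico")
--
--     #ak sa v typovanom cisle nenachadza ani jedna cislica
--     if len(napoveda) == 0:
--         return 'Bagels'
--     else:
--         napoveda.sort()
--         return " ".join(napoveda)
-- ===== SOURCE B (Python) =====
-- def getNapovedy(pokus, taj_cislo):
--     if pokus == taj_cislo:
--         return "Spravne!"
--     tajset = set(taj_cislo)
--     pairs = list(zip(pokus, taj_cislo))
--     fermi = sum(a == b for a, b in pairs)
--     pico = sum(a != b and a in tajset for a, b in pairs)
--     if fermi == 0 and pico == 0:
--         return 'Bagels'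
--     return " ".join(["Fermi"] * fermi + ["Pico"] * pico)
-- ===== Notes on version B (the rewrite author's own statement) =====
-- stated objective: alternative
-- what changed: B builds a set of the secret's characters once and computes Fermi/Pico counts by two sum-comprehensions over zip(pokus, taj_cislo), then reconstructs the already-ordered output from the counts, eliminating A's index loop, hint-list building and sort.
import Mathlib
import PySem

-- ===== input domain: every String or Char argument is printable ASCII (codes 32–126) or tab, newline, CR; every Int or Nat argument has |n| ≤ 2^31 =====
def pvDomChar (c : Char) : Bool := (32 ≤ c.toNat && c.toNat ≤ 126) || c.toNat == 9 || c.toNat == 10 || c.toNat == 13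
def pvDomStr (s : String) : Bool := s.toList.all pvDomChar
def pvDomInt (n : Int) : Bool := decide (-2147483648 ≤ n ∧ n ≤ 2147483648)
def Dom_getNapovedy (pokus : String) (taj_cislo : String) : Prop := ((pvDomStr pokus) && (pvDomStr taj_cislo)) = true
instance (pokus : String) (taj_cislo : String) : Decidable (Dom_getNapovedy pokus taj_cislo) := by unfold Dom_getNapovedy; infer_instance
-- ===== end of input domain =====

-- B replaces A's index loop + hint list + sort by a set of the secret's characters, two sum-comprehensions over zip, and a rebuild of the ordered output from the counts (alternative decomposition, similar cost).

-- ===== PORT A =====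
-- the 'for i in range(len(pokus))' loop; taj_cislo[i] may raise IndexError → none
def getNapovedyLoop (p t : List Char) (i : Nat) (acc : List String) : Option (List String) :=
  if h : i < p.length then
    match PySem.List.pyGet? t (Int.ofNat i) with
    | none => none
    | some tc =>
      let acc' := if p[i] = tc then acc ++ ["Fermi"]
                  else if t.contains p[i] then acc ++ ["Pico"] else acc
      getNapovedyLoop p t (i + 1) acc'
  else some acc
termination_by p.length - i

def getNapovedy (pokus : String) (taj_cislo : String) : String :=
  if pokus = taj_cislo then "Spravne!"
  else
    match getNapovedyLoop pokus.toList taj_cislo.toList 0 [] with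
    | none => ""  -- IndexError in Python; outside Pre_
    | some napoveda =>
      if napoveda.length = 0 then "Bagels"
      else PySem.Str.join " " (PySem.List.sorted napoveda (fun x => x) false)

-- ===== PORT B =====
def getNapovedy_alt (pokus : String) (taj_cislo : String) : String :=
  if pokus = taj_cislo then "Spravne!"
  else
    let tajset : PySem.Set Char := PySem.Set.ofList taj_cislo.toList
    let pairs := pokus.toList.zip taj_cislo.toList
    let fermi := pairs.foldl (fun s ab => s + (if ab.1 = ab.2 then 1 else 0)) 0
    let pico := pairs.foldl (fun s ab => s + (if ab.1 ≠ ab.2 ∧ PySem.Set.contains tajset ab.1 then 1 else 0)) 0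
    if fermi = 0 ∧ pico = 0 then "Bagels"
    else PySem.Str.join " " (List.replicate fermi "Fermi" ++ List.replicate pico "Pico")

-- ===== PRECONDITION & SPEC =====
-- Pre_ excludes exactly the inputs where A raises IndexError: pokus longer than taj_cislo and not equal to it.
def Pre_getNapovedy (pokus : String) (taj_cislo : String) : Prop :=
  pokus = taj_cislo ∨ pokus.toList.length ≤ taj_cislo.toList.length
instance (pokus : String) (taj_cislo : String) : Decidable (Pre_getNapovedy pokus taj_cislo) := by unfold Pre_getNapovedy; infer_instance

def pvWitness_getNapovedy : String × String := ("123", "143")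

def Spec_getNapovedy (pokus : String) (taj_cislo : String) (out : String) : Prop := out = getNapovedy_alt pokus taj_cislo
instance (pokus : String) (taj_cislo : String) (out : String) : Decidable (Spec_getNapovedy pokus taj_cislo out) := by unfold Spec_getNapovedy; infer_instance

-- ===== CLAIM (what is proved, stated in full; the proofs are below) =====
def Claim_equal_getNapovedy : Prop := ∀ (pokus : String) (taj_cislo : String), Dom_getNapovedy pokus taj_cislo → Pre_getNapovedy pokus taj_cislo → Spec_getNapovedy pokus taj_cislo (getNapovedy pokus taj_cislo)

-- ===== LEMMAS AND PROOFS =====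

-- the hints A's loop produces, expressed over the zipped pairs (proof-side helper)
def hints (t : List Char) (pairs : List (Char × Char)) : List String :=
  pairs.foldr (fun ab acc =>
    if ab.1 = ab.2 then "Fermi" :: acc
    else if t.contains ab.1 then "Pico" :: acc else acc) []

lemma loop_eq_hints (p t : List Char) (hle : p.length ≤ t.length) :
    ∀ i, i ≤ p.length → ∀ acc,
      getNapovedyLoop p t i acc = some (acc ++ hints t ((p.drop i).zip (t.drop i))) := by
  intro i
  induction hn : p.length - i using Nat.strong_induction_on generalizing i with
  | _ n ih =>
    intro hi acc
    rw [getNapovedyLoop]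
    by_cases h : i < p.length
    · have hit : i < t.length := lt_of_lt_of_le h hle
      have hg : PySem.List.pyGet? t (Int.ofNat i) = some t[i] := by
        simpa using PySem.List.pyGet?_natCast (xs := t) (n := i) hit
      simp only [dif_pos h, hg]
      have hdp : p.drop i = p[i] :: p.drop (i + 1) := List.drop_eq_getElem_cons h
      have hdt : t.drop i = t[i] :: t.drop (i + 1) := List.drop_eq_getElem_cons hit
      rw [hdp, hdt]
      have hrec := ih (p.length - (i + 1)) (by omega) (i + 1) rfl (by omega)
      by_cases h1 : p[i] = t[i]
      · simp only [if_pos h1, List.zip_cons_cons, hints, List.foldr_cons, if_pos h1]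
        rw [hrec]
        simp [hints]
      · simp only [if_neg h1, List.zip_cons_cons, hints, List.foldr_cons, if_neg h1]
        by_cases h2 : t.contains p[i]
        · simp only [if_pos h2]
          rw [hrec]
          simp [hints]
        · simp only [if_neg h2]
          rw [hrec]
          simp [hints]
    · have : i = p.length := by omega
      subst this
      simp [hints]

lemma hints_mem (t : List Char) (pairs : List (Char × Char)) :
    ∀ x ∈ hints t pairs, x = "Fermi" ∨ x = "Pico" := by
  induction pairs with
  | nil => simp [hints]
  | cons ab rest ih =>
    intro x hx
    simp only [hints, List.foldr_cons] at hx
    by_cases h1 : ab.1 = ab.2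
    · rw [if_pos h1] at hx
      rcases List.mem_cons.mp hx with rfl | hx
      · exact Or.inl rfl
      · exact ih x (by simpa [hints] using hx)
    · rw [if_neg h1] at hx
      by_cases h2 : t.contains ab.1
      · rw [if_pos h2] at hx
        rcases List.mem_cons.mp hx with rfl | hx
        · exact Or.inr rfl
        · exact ih x (by simpa [hints] using hx)
      · rw [if_neg h2] at hx
        exact ih x (by simpa [hints] using hx)

lemma fold_count (f : Char × Char → Prop) [DecidablePred f] (pairs : List (Char × Char)) :
    ∀ s : Nat, pairs.foldl (fun s ab => s + (if f ab then 1 else 0)) s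
      = s + pairs.countP (fun ab => decide (f ab)) := by
  induction pairs with
  | nil => simp
  | cons ab rest ih =>
    intro s
    simp only [List.foldl_cons, ih, List.countP_cons]
    by_cases h : f ab <;> simp [h] <;> omega

lemma set_contains_eq (t : List Char) (x : Char) :
    PySem.Set.contains (PySem.Set.ofList t) x = t.contains x := by
  by_cases h : x ∈ t <;>
    simp [PySem.Set.contains_eq_listContains, List.contains_iff_mem, PySem.Set.mem_ofList, h]

lemma hints_count_fermi (t : List Char) (pairs : List (Char × Char)) :
    (hints t pairs).count "Fermi" = pairs.countP (fun ab => ab.1 = ab.2) := by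
  induction pairs with
  | nil => simp [hints]
  | cons ab rest ih =>
    simp only [hints, List.foldr_cons, List.countP_cons] at *
    split_ifs with h1 h2 <;> simp_all [List.count_cons]

lemma hints_count_pico (t : List Char) (pairs : List (Char × Char)) :
    (hints t pairs).count "Pico" = pairs.countP (fun ab => ab.1 ≠ ab.2 ∧ t.contains ab.1) := by
  induction pairs with
  | nil => simp [hints]
  | cons ab rest ih =>
    simp only [hints, List.foldr_cons, List.countP_cons] at *
    split_ifs with h1 h2 <;> simp_all [List.count_cons, h1]

-- a list whose elements are all "Fermi" or "Pico" is a permutation of its canonical ordered form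
lemma perm_FP (l : List String) (h : ∀ x ∈ l, x = "Fermi" ∨ x = "Pico") :
    (List.replicate (l.count "Fermi") "Fermi" ++ List.replicate (l.count "Pico") "Pico").Perm l := by
  induction l with
  | nil => simp
  | cons a t ih =>
    have ht : ∀ x ∈ t, x = "Fermi" ∨ x = "Pico" := fun x hx => h x (List.mem_cons_of_mem _ hx)
    have iht := ih ht
    rcases h a (List.mem_cons_self) with ha | ha
    · subst ha
      have h2 : (t.count "Pico" : Nat) = ((("Fermi" : String) :: t).count "Pico") := by simp
      rw [List.count_cons_self, ← h2, List.replicate_succ, List.cons_append]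
      exact iht.cons _
    · subst ha
      have h1 : (t.count "Fermi" : Nat) = ((("Pico" : String) :: t).count "Fermi") := by simp
      rw [List.count_cons_self, ← h1, List.replicate_succ]
      exact List.Perm.trans List.perm_middle (iht.cons _)

lemma sorted_FP (l : List String) (h : ∀ x ∈ l, x = "Fermi" ∨ x = "Pico") :
    PySem.List.sorted l (fun x => x) false =
      List.replicate (l.count "Fermi") "Fermi" ++ List.replicate (l.count "Pico") "Pico" := by
  apply PySem.List.sorted_id_eq_of_perm_of_pairwise
  · exact perm_FP l h
  · refine List.pairwise_append.mpr ⟨?_, ?_, ?_⟩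
    · exact List.pairwise_replicate.mpr (Or.inr le_rfl)
    · exact List.pairwise_replicate.mpr (Or.inr le_rfl)
    · intro a ha b hb
      rw [List.eq_of_mem_replicate ha, List.eq_of_mem_replicate hb]
      exact le_of_lt (by rw [String.lt_iff_toList_lt]; decide)

lemma count_zero_iff (l : List String) (h : ∀ x ∈ l, x = "Fermi" ∨ x = "Pico") :
    (l.count "Fermi" = 0 ∧ l.count "Pico" = 0) ↔ l = [] := by
  constructor
  · rintro ⟨hF, hP⟩
    cases l with
    | nil => rfl
    | cons a t =>
      exfalso
      rcases h a List.mem_cons_self with ha | ha <;> subst ha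
      · have := List.count_pos_iff.mpr (List.mem_cons_self (a := ("Fermi" : String)) (l := t))
        omega
      · have := List.count_pos_iff.mpr (List.mem_cons_self (a := ("Pico" : String)) (l := t))
        omega
  · rintro rfl; simp

-- ===== VERDICT (by name: the statement is the Claim_ definition above) =====
theorem getNapovedy_spec : Claim_equal_getNapovedy := by
  intro pokus taj_cislo _ hpre
  unfold Spec_getNapovedy getNapovedy getNapovedy_alt
  by_cases heq : pokus = taj_cislo
  · simp [heq]
  · simp only [if_neg heq]
    have hle : pokus.toList.length ≤ taj_cislo.toList.length := by
      rcases hpre with h | h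
      · exact absurd h heq
      · exact h
    set p := pokus.toList
    set t := taj_cislo.toList
    rw [loop_eq_hints p t hle 0 (Nat.zero_le _) []]
    simp only [List.drop_zero, List.nil_append]
    set pairs := p.zip t with hpairs
    have hmem := hints_mem t pairs
    have hF : pairs.foldl (fun s ab => s + (if ab.1 = ab.2 then 1 else 0)) 0
        = (hints t pairs).count "Fermi" := by
      rw [fold_count (fun ab : Char × Char => ab.1 = ab.2), hints_count_fermi]
      simp
    have hP : pairs.foldl (fun s ab => s + (if ab.1 ≠ ab.2 ∧ PySem.Set.contains (PySem.Set.ofList t) ab.1 then 1 else 0)) 0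
        = (hints t pairs).count "Pico" := by
      rw [fold_count (fun ab : Char × Char => ab.1 ≠ ab.2 ∧ PySem.Set.contains (PySem.Set.ofList t) ab.1), hints_count_pico]
      simp only [Nat.zero_add]
      apply List.countP_congr
      intro ab _
      simp [set_contains_eq]
    rw [hF, hP]
    by_cases hz : (hints t pairs).count "Fermi" = 0 ∧ (hints t pairs).count "Pico" = 0
    · have hnil : hints t pairs = [] := (count_zero_iff _ hmem).mp hz
      simp [hnil]
    · have hne : hints t pairs ≠ [] := fun hnil => hz ((count_zero_iff _ hmem).mpr hnil)
      have hlen : (hints t pairs).length ≠ 0 := by simpa [List.length_eq_zero_iff] using hne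
      simp only [if_neg hlen, if_neg hz]
      rw [sorted_FP _ hmem]
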